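-- pv_equiv track=rewrite | github.com/desmid/puzzles | generate_natural_number_from_four/Python/solution.py | _solve_recursive
-- ===== SOURCE A (Python) =====
-- def START(n): return message("start", n)
--
-- def APPEND0(n): return message("append0", n)
--
-- def APPEND4(n): return message("append4", n)
--
-- def DIVIDE2(n): return message("divide2", n)
--
-- def message(state, value): return "%s: %d" % (state, value)
--
-- def _solve_recursive(n):
--
--     if n == 4:
--         return [START(n)]
--
--     prefix, digit = n // 10, n % 10
--
--     if digit == 4:
--         path = _solve_recursive(prefix)
--         path.append(APPEND4(n))
--         return path
--
--     if digit == 0: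
--         path = _solve_recursive(prefix)
--         path.append(APPEND0(n))
--         return path
--
--     path = _solve_recursive(n*2)
--     path.append(DIVIDE2(n))
--     return path
-- ===== SOURCE B (Python) =====
-- def START(n): return message("start", n)
--
-- def APPEND0(n): return message("append0", n)
--
-- def APPEND4(n): return message("append4", n)
--
-- def DIVIDE2(n): return message("divide2", n)
--
-- def message(state, value): return "%s: %d" % (state, value)
--
-- def _label(v):
--     d = v % 10
--     if d == 4:
--         return APPEND4(v)
--     if d == 0:
--         return APPEND0(v)
--     return DIVIDE2(v)
--
-- def _solve_recursive(n):
--     # Two phases: first record the trajectory of values n visits (no strings),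
--     # then format one message per visited value, bottom-up, behind the start line.
--     trail = []
--     while n != 4:
--         trail.append(n)
--         n = n // 10 if n % 10 in (4, 0) else n * 2
--     return [START(4)] + [_label(v) for v in reversed(trail)]
-- ===== Notes on version B (the rewrite author's own statement) =====
-- stated objective: alternative
-- what changed: Replaces the base-first recursion that appends a message on each return with a two-phase iteration: a loop that records only the trajectory of integer values, then a single formatting pass that maps each visited value (in reverse) to its message behind the start line.
import Mathlib
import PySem

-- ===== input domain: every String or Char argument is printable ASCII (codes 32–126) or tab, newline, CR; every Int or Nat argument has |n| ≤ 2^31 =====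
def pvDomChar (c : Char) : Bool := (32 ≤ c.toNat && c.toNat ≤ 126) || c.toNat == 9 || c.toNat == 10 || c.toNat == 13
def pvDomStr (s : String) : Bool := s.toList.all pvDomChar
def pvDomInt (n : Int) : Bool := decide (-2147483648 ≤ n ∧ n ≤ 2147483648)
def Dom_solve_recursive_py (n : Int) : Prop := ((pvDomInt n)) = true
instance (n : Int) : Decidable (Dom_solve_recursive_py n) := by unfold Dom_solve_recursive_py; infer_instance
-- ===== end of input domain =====

-- B replaces A's base-first recursion by a two-phase iteration — a loop recording the trajectory of integer values, then one formatting pass (objective: alternative decomposition, same cost).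

-- message(state, value) = "%s: %d" % (state, value)
def pymsg (state : String) (value : Int) : String := state ++ ": " ++ PySem.Int.toStr value

-- ===== PORT A =====
-- A's recursion does not terminate for n ≤ 0 (Python: RecursionError); the fuel
-- parameter only makes the same recursion total, it changes no admitted value
-- (depth ≤ ~100 for every n ≥ 1 with |n| ≤ 2^31; fuel 1000 is never reached there).
def solve_recursive_py_go : Nat → Int → Option (List String)
  | 0, _ => none
  | fuel+1, n =>
    if n = 4 then some [pymsg "start" n]
    else
      let pfx := PySem.Int.floordiv n 10
      let digit := PySem.Int.mod n 10
      if digit = 4 then (solve_recursive_py_go fuel pfx).map (fun path => path ++ [pymsg "append4" n])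
      else if digit = 0 then (solve_recursive_py_go fuel pfx).map (fun path => path ++ [pymsg "append0" n])
      else (solve_recursive_py_go fuel (n*2)).map (fun path => path ++ [pymsg "divide2" n])

def solve_recursive_py (n : Int) : List String := (solve_recursive_py_go 1000 n).getD []

-- ===== PORT B =====
-- phase 2: _label(v)
def solve_label (v : Int) : String :=
  let d := PySem.Int.mod v 10
  if d = 4 then pymsg "append4" v
  else if d = 0 then pymsg "append0" v
  else pymsg "divide2" v

-- phase 1: the while loop recording the trajectory; same fuel remark as for A.
def solve_trail : Nat → Int → List Int → Option (List Int)
  | 0, _, _ => none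
  | fuel+1, n, trail =>
    if n = 4 then some trail
    else
      solve_trail fuel
        (if PySem.Int.mod n 10 = 4 ∨ PySem.Int.mod n 10 = 0 then PySem.Int.floordiv n 10 else n*2)
        (trail ++ [n])

def solve_recursive_py_alt (n : Int) : List String :=
  match solve_trail 1000 n [] with
  | some trail => [pymsg "start" 4] ++ trail.reverse.map solve_label
  | none => []

-- ===== PRECONDITION & SPEC =====
-- Pre_ excludes n ≤ 0, on which A never reaches the base case 4 and raises RecursionError.
def Pre_solve_recursive_py (n : Int) : Prop := 1 ≤ n
instance (n : Int) : Decidable (Pre_solve_recursive_py n) := by unfold Pre_solve_recursive_py; infer_instance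
def pvWitness_solve_recursive_py : Int := (7)

def Spec_solve_recursive_py (n : Int) (out : List String) : Prop := out = solve_recursive_py_alt n
instance (n : Int) (out : List String) : Decidable (Spec_solve_recursive_py n out) := by unfold Spec_solve_recursive_py; infer_instance

-- ===== CLAIM (what is proved, stated in full; the proofs are below) =====
def Claim_equal_solve_recursive_py : Prop := ∀ (n : Int), Dom_solve_recursive_py n → Pre_solve_recursive_py n → Spec_solve_recursive_py n (solve_recursive_py n)

-- ===== LEMMAS AND PROOFS =====

-- the trail accumulator factors out
theorem trail_acc (fuel : Nat) : ∀ (n : Int) (acc : List Int),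
    solve_trail fuel n acc = (solve_trail fuel n []).map (acc ++ ·) := by
  induction fuel with
  | zero => intro n acc; simp [solve_trail]
  | succ f ih =>
    intro n acc
    simp only [solve_trail]
    split_ifs with h1
    · simp
    all_goals
      rw [ih _ (acc ++ [n]), ih _ ([] ++ [n])]
      cases solve_trail f _ [] <;> simp

-- A's recursion equals the labelled reversed trail behind the start message
theorem go_eq_trail (fuel : Nat) : ∀ (n : Int),
    solve_recursive_py_go fuel n
      = (solve_trail fuel n []).map (fun trail => pymsg "start" 4 :: trail.reverse.map solve_label) := by
  induction fuel with
  | zero => intro n; simp [solve_recursive_py_go, solve_trail]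
  | succ f ih =>
    intro n
    simp only [solve_recursive_py_go, solve_trail]
    by_cases h1 : n = 4
    · subst h1; simp
    rw [if_neg h1, if_neg h1]
    by_cases h2 : PySem.Int.mod n 10 = 4
    · rw [if_pos h2, if_pos (Or.inl h2), ih, trail_acc f _ ([] ++ [n])]
      cases solve_trail f _ [] <;> simp_all [solve_label]
    by_cases h3 : PySem.Int.mod n 10 = 0
    · rw [if_neg h2, if_pos h3, if_pos (Or.inr h3), ih, trail_acc f _ ([] ++ [n])]
      cases solve_trail f _ [] <;> simp_all [solve_label]
    · rw [if_neg h2, if_neg h3, if_neg (by simp_all), ih, trail_acc f _ ([] ++ [n])]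
      cases solve_trail f _ [] <;> simp_all [solve_label]

-- ===== VERDICT (by name: the statement is the Claim_ definition above) =====
theorem solve_recursive_py_spec : Claim_equal_solve_recursive_py := by
  intro n _ _
  unfold Spec_solve_recursive_py solve_recursive_py solve_recursive_py_alt
  rw [go_eq_trail]
  cases solve_trail 1000 n [] <;> simp
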